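-- pv_equiv track=rewrite | github.com/devnelmar/agent-dashboard | backend/server.py | _join_form_lines
-- ===== SOURCE A (Python) =====
-- def _join_form_lines(lines: list) -> str:
--     """
--     Reconstruct word-wrapped text from inside a Hermes form box.
--     - Lines with 4-space indent = new paragraph.
--     - Lines without indent = word-wrap continuation (concatenate directly).
--     - Empty lines = paragraph separator.
--     """
--     paragraphs = []
--     current = []
--
--     for l in lines:
--         if not l.strip():
--             if current:
--                 paragraphs.append("".join(current))
--                 current = []
--         elif l.startswith("    "):       # 4-space indent → new paragraph
--             if current:
--                 paragraphs.append("".join(current))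
--                 current = []
--             current.append(l[4:])        # strip the leading 4 spaces
--         else:
--             current.append(l)            # word-wrap continuation
--
--     if current:
--         paragraphs.append("".join(current))
--
--     return "\n".join(paragraphs).strip()
-- ===== SOURCE B (Python) =====
-- def _join_form_lines(lines: list) -> str:
--     # Paragraph-at-a-time scan (outer loop per paragraph, inner run of
--     # continuation lines) instead of A's flush-on-transition state machine.
--     def is_cont(l):
--         return bool(l.strip()) and not l.startswith("    ")
--
--     paragraphs = []
--     rest = lines
--     while rest:
--         l, rest = rest[0], rest[1:]
--         if not l.strip():
--             continue
--         head = l[4:] if l.startswith("    ") else l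
--         k = 0
--         while k < len(rest) and is_cont(rest[k]):
--             k += 1
--         paragraphs.append("".join([head] + rest[:k]))
--         rest = rest[k:]
--     return "\n".join(paragraphs).strip()
-- ===== Notes on version B (the rewrite author's own statement) =====
-- stated objective: alternative
-- what changed: Replaces A's single-pass accumulate-into-current/flush-on-transition state machine with a paragraph-at-a-time scan: an outer loop that finds each paragraph head and an inner run (takewhile-style) that consumes its continuation lines, building each paragraph in one go.
import Mathlib
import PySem

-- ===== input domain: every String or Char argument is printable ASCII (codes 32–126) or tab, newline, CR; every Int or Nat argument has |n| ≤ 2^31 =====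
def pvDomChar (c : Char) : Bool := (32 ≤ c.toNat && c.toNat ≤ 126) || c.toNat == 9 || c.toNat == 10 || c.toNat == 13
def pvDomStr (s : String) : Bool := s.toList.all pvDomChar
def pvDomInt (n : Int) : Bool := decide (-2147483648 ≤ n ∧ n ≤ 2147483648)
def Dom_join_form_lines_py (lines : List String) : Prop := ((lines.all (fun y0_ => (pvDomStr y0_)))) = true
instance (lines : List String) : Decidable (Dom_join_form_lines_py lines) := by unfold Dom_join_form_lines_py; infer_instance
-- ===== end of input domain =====

-- B replaces A's accumulate-and-flush state machine by a paragraph-at-a-time scan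
-- (outer loop per paragraph, inner run of continuation lines); objective: alternative, same cost.

-- ===== PORT A =====
-- one step of A's for-loop over the state (paragraphs, current)
def stepA_jfl (st : List String × List String) (l : String) : List String × List String :=
  if PySem.Str.strip l = "" then
    (if st.2.isEmpty then st else (st.1 ++ [PySem.Str.join "" st.2], []))
  else if PySem.Str.startswith l "    " then
    (if st.2.isEmpty then (st.1, [PySem.Str.slice l (some 4) none])
     else (st.1 ++ [PySem.Str.join "" st.2], [PySem.Str.slice l (some 4) none]))
  else
    (st.1, st.2 ++ [l])

def join_form_lines_py (lines : List String) : String :=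
  let st := lines.foldl stepA_jfl ([], [])
  let paragraphs := if st.2.isEmpty then st.1 else st.1 ++ [PySem.Str.join "" st.2]
  PySem.Str.strip (PySem.Str.join "\n" paragraphs)

-- ===== PORT B =====
-- is_cont in Source B: a non-separator, non-indented line continues the current paragraph
def isCont_jfl (l : String) : Bool :=
  !(PySem.Str.strip l == "") && !(PySem.Str.startswith l "    ")

-- the outer while-loop of Source B: one paragraph per iteration (rest[:k]/rest[k:] = takeWhile/dropWhile is_cont)
def goB_jfl : List String → List String
  | [] => []
  | l :: rest =>
    if PySem.Str.strip l = "" then goB_jfl rest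
    else
      let head := if PySem.Str.startswith l "    " then PySem.Str.slice l (some 4) none else l
      PySem.Str.join "" (head :: rest.takeWhile isCont_jfl) :: goB_jfl (rest.dropWhile isCont_jfl)
termination_by ls => ls.length
decreasing_by
  · simp
  · exact Nat.lt_succ_of_le (List.length_dropWhile_le _ _)

def join_form_lines_py_alt (lines : List String) : String :=
  PySem.Str.strip (PySem.Str.join "\n" (goB_jfl lines))

-- ===== PRECONDITION & SPEC =====
def Spec_join_form_lines_py (lines : List String) (out : String) : Prop := out = join_form_lines_py_alt lines
instance (lines : List String) (out : String) : Decidable (Spec_join_form_lines_py lines out) := by unfold Spec_join_form_lines_py; infer_instance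

-- ===== CLAIM (what is proved, stated in full; the proofs are below) =====
def Claim_equal_join_form_lines_py : Prop := ∀ (lines : List String), Dom_join_form_lines_py lines → Spec_join_form_lines_py lines (join_form_lines_py lines)

-- ===== LEMMAS AND PROOFS =====

-- A's final flush: the paragraph list A joins, given the fold's end state
def finA_jfl (st : List String × List String) : List String :=
  if st.2.isEmpty then st.1 else st.1 ++ [PySem.Str.join "" st.2]

-- Invariant linking A's fold to B's paragraph recursion: with empty pending current
-- the fold yields paras ++ goB; with pending current ≠ [] the head of the remaining
-- lines' continuation run is absorbed into that paragraph.
lemma key_jfl (ls : List String) :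
    (∀ paras : List String, finA_jfl (ls.foldl stepA_jfl (paras, [])) = paras ++ goB_jfl ls)
    ∧ (∀ (paras cur : List String), cur ≠ [] →
        finA_jfl (ls.foldl stepA_jfl (paras, cur)) =
          paras ++ (PySem.Str.join "" (cur ++ ls.takeWhile isCont_jfl)
                     :: goB_jfl (ls.dropWhile isCont_jfl))) := by
  induction ls with
  | nil =>
    constructor
    · intro paras; simp [finA_jfl, goB_jfl]
    · intro paras cur hcur
      simp [finA_jfl, List.isEmpty_iff, hcur, goB_jfl]
  | cons l ls ih =>
    constructor
    · intro paras
      rw [List.foldl_cons]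
      by_cases h1 : PySem.Str.strip l = ""
      · have hs : stepA_jfl (paras, []) l = (paras, []) := by simp [stepA_jfl, h1]
        rw [hs, ih.1, goB_jfl]
        simp [h1]
      · by_cases h2 : PySem.Str.startswith l "    " = true
        · simp at h2
          have hs : stepA_jfl (paras, []) l = (paras, [PySem.Str.slice l (some 4) none]) := by
            simp [stepA_jfl, h1, h2]
          rw [hs, ih.2 paras [PySem.Str.slice l (some 4) none] (by simp), goB_jfl]
          simp [h1, h2]
        · simp at h2
          have hs : stepA_jfl (paras, []) l = (paras, [l]) := by
            simp [stepA_jfl, h1, h2]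
          rw [hs, ih.2 paras [l] (by simp), goB_jfl]
          simp [h1, h2]
    · intro paras cur hcur
      have hne : cur.isEmpty = false := by simpa [List.isEmpty_iff] using hcur
      rw [List.foldl_cons]
      by_cases h1 : PySem.Str.strip l = ""
      · have hs : stepA_jfl (paras, cur) l = (paras ++ [PySem.Str.join "" cur], []) := by
          simp [stepA_jfl, h1, hne]
        have hc : isCont_jfl l = false := by simp [isCont_jfl, h1]
        rw [hs, ih.1, List.takeWhile_cons_of_neg (by simp [hc]),
            List.dropWhile_cons_of_neg (by simp [hc]), goB_jfl]
        simp [h1]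
      · by_cases h2 : PySem.Str.startswith l "    " = true
        · simp at h2
          have hs : stepA_jfl (paras, cur) l
              = (paras ++ [PySem.Str.join "" cur], [PySem.Str.slice l (some 4) none]) := by
            simp [stepA_jfl, h1, h2, hne]
          have hc : isCont_jfl l = false := by simp [isCont_jfl, h2]
          rw [hs, ih.2 _ [PySem.Str.slice l (some 4) none] (by simp),
              List.takeWhile_cons_of_neg (by simp [hc]),
              List.dropWhile_cons_of_neg (by simp [hc]), goB_jfl]
          simp [h1, h2]
        · simp at h2
          have hs : stepA_jfl (paras, cur) l = (paras, cur ++ [l]) := by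
            simp [stepA_jfl, h1, h2]
          have hc : isCont_jfl l = true := by simp [isCont_jfl, h1, h2]
          rw [hs, ih.2 _ (cur ++ [l]) (by simp),
              List.takeWhile_cons_of_pos (by simp [hc]),
              List.dropWhile_cons_of_pos (by simp [hc])]
          simp

-- ===== VERDICT (by name: the statement is the Claim_ definition above) =====
theorem join_form_lines_py_spec : Claim_equal_join_form_lines_py := by
  intro lines _
  unfold Spec_join_form_lines_py join_form_lines_py join_form_lines_py_alt
  have h := (key_jfl lines).1 []
  simp only [finA_jfl] at h
  simp only [h, List.nil_append]
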